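-- pv_equiv track=rewrite | github.com/Honixbadger/almanca-turkce-sozluk | almanca-sozluk-projesi/scripts/enrich_verb_forms.py | slot_from_pronouns
-- ===== SOURCE A (Python) =====
-- def slot_from_pronouns(pronouns: list[str]) -> str:
--     cleaned = {str(item).strip().casefold() for item in pronouns if str(item).strip()}
--     if cleaned == {"ich"}:
--         return "ich"
--     if cleaned == {"du"}:
--         return "du"
--     if cleaned == {"er", "sie", "es"}:
--         return "er/sie/es"
--     if cleaned == {"wir"}:
--         return "wir"
--     if cleaned == {"ihr"}:
--         return "ihr"
--     if cleaned in ({"sie"}, {"sie", "sie/sie"}):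
--         return "sie/Sie"
--     return ""
-- ===== SOURCE B (Python) =====
-- _BIT = {"ich": 1, "du": 2, "er": 4, "sie": 8, "es": 16, "wir": 32, "ihr": 64, "sie/sie": 128}
-- _SLOT = {1: "ich", 2: "du", 28: "er/sie/es", 32: "wir", 64: "ihr", 8: "sie/Sie", 136: "sie/Sie"}
--
--
-- def slot_from_pronouns(pronouns: list[str]) -> str:
--     mask = 0
--     for item in pronouns:
--         c = str(item).strip().casefold()
--         if c:
--             mask |= _BIT.get(c, 256)
--     return _SLOT.get(mask, "")
-- ===== Notes on version B (the rewrite author's own statement) =====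
-- stated objective: alternative
-- what changed: Replaced A's set construction plus a chain of set-equality comparisons by a single pass that ORs a per-pronoun bit flag into an integer mask and looks the final mask up in an int-keyed table.
import Mathlib
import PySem

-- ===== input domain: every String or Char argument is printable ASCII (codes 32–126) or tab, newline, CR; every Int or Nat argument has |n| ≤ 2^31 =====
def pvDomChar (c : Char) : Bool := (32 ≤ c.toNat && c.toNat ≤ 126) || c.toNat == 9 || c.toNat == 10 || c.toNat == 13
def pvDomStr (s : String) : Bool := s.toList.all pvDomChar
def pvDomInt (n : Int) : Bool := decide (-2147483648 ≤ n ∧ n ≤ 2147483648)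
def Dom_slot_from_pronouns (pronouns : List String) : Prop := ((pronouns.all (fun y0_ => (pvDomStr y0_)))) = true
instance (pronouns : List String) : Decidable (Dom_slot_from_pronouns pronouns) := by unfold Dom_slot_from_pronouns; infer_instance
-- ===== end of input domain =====

-- B replaces A's set construction + chain of set-equality tests by a single pass that ORs
-- per-pronoun bit flags into an integer mask and looks the mask up in an int-keyed table (alternative).
-- casefold is ported as PySem.Str.lower: exact on the ASCII domain Dom_slot_from_pronouns.

-- ===== PORT A =====
def slot_from_pronouns (pronouns : List String) : String :=
  -- set comprehension: {str(item).strip().casefold() for item in pronouns if str(item).strip()}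
  let cleaned : PySem.Set String :=
    pronouns.foldl
      (fun s item =>
        if PySem.Str.strip item ≠ "" then
          PySem.Set.add s (PySem.Str.lower (PySem.Str.strip item))
        else s)
      PySem.Set.empty
  if PySem.Set.equal cleaned ["ich"] then "ich"
  else if PySem.Set.equal cleaned ["du"] then "du"
  else if PySem.Set.equal cleaned ["er", "sie", "es"] then "er/sie/es"
  else if PySem.Set.equal cleaned ["wir"] then "wir"
  else if PySem.Set.equal cleaned ["ihr"] then "ihr"
  else if PySem.Set.equal cleaned ["sie"] || PySem.Set.equal cleaned ["sie", "sie/sie"] then "sie/Sie"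
  else ""

-- ===== PORT B =====
-- _BIT: bit flag per known pronoun (masks are nonnegative, so Nat's ||| is Python's |)
def pvBitTable : PySem.Dict String Nat :=
  PySem.Dict.mk [("ich", 1), ("du", 2), ("er", 4), ("sie", 8), ("es", 16),
                 ("wir", 32), ("ihr", 64), ("sie/sie", 128)]

-- _SLOT: mask value -> slot label
def pvSlotTable : PySem.Dict Nat String :=
  PySem.Dict.mk [(1, "ich"), (2, "du"), (28, "er/sie/es"), (32, "wir"),
                 (64, "ihr"), (8, "sie/Sie"), (136, "sie/Sie")]

def slot_from_pronouns_alt (pronouns : List String) : String :=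
  -- c = str(item).strip().casefold() is inlined into its two uses
  let mask : Nat :=
    pronouns.foldl
      (fun m item =>
        if PySem.Str.lower (PySem.Str.strip item) ≠ "" then
          m ||| PySem.Dict.getD pvBitTable (PySem.Str.lower (PySem.Str.strip item)) 256
        else m)
      0
  PySem.Dict.getD pvSlotTable mask ""

-- ===== PRECONDITION & SPEC =====
def Spec_slot_from_pronouns (pronouns : List String) (out : String) : Prop := out = slot_from_pronouns_alt pronouns
instance (pronouns : List String) (out : String) : Decidable (Spec_slot_from_pronouns pronouns out) := by unfold Spec_slot_from_pronouns; infer_instance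

-- ===== CLAIM (what is proved, stated in full; the proofs are below) =====
def Claim_equal_slot_from_pronouns : Prop := ∀ (pronouns : List String), Dom_slot_from_pronouns pronouns → Spec_slot_from_pronouns pronouns (slot_from_pronouns pronouns)

-- ===== LEMMAS AND PROOFS =====

-- abbreviations used only by the proofs
def pvBits (c : String) : Nat := PySem.Dict.getD pvBitTable c 256
def pvMaskOf (l : List String) : Nat := l.foldl (fun m c => m ||| pvBits c) 0

-- lower preserves emptiness (it maps characters one-for-one)
lemma pv_lower_eq_empty (s : String) : (PySem.Str.lower s = "") ↔ (s = "") := by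
  simp [PySem.Str.lower, PySem.Chars.lower]

-- the cleaned token list both programs effectively iterate over
def pvClean (pronouns : List String) : List String :=
  (pronouns.map (fun p => PySem.Str.lower (PySem.Str.strip p))).filter (fun c => c ≠ "")

-- A's comprehension fold builds the set of pvClean
lemma pv_cleanA_eq (l : List String) (s : PySem.Set String) :
    l.foldl
      (fun s item =>
        if PySem.Str.strip item ≠ "" then
          PySem.Set.add s (PySem.Str.lower (PySem.Str.strip item))
        else s) s
    = (pvClean l).foldl PySem.Set.add s := by
  induction l generalizing s with
  | nil => rfl
  | cons h t ih =>
    simp only [pvClean, List.foldl_cons, List.map_cons, List.filter_cons]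
    by_cases hs : PySem.Str.strip h = ""
    · rw [if_neg (by simp [hs]), if_neg (by simp [(pv_lower_eq_empty _).mpr hs])]
      exact ih s
    · rw [if_pos hs, if_pos (by simp [(pv_lower_eq_empty (PySem.Str.strip h)).ne, hs]),
        List.foldl_cons]
      exact ih _

-- B's mask fold is the mask fold over pvClean
lemma pv_cleanB_eq (l : List String) (m : Nat) :
    l.foldl
      (fun m item =>
        if PySem.Str.lower (PySem.Str.strip item) ≠ "" then
          m ||| PySem.Dict.getD pvBitTable (PySem.Str.lower (PySem.Str.strip item)) 256
        else m) m
    = (pvClean l).foldl (fun m c => m ||| pvBits c) m := by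
  induction l generalizing m with
  | nil => simp [pvClean]
  | cons h t ih =>
    simp only [pvClean, List.foldl_cons, List.map_cons, List.filter_cons]
    by_cases hs : PySem.Str.lower (PySem.Str.strip h) = ""
    · rw [if_neg (by simp [hs]), if_neg (by simp [hs])]
      exact ih m
    · rw [if_pos hs, if_pos (by simp [hs]), List.foldl_cons]
      exact ih _

-- evaluate the bit table
lemma pv_bits_eval (c : String) :
    pvBits c =
      if c = "ich" then 1 else if c = "du" then 2 else if c = "er" then 4
      else if c = "sie" then 8 else if c = "es" then 16 else if c = "wir" then 32
      else if c = "ihr" then 64 else if c = "sie/sie" then 128 else 256 := by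
  by_cases h1 : c = "ich"; · subst h1; decide
  by_cases h2 : c = "du"; · subst h2; decide
  by_cases h3 : c = "er"; · subst h3; decide
  by_cases h4 : c = "sie"; · subst h4; decide
  by_cases h5 : c = "es"; · subst h5; decide
  by_cases h6 : c = "wir"; · subst h6; decide
  by_cases h7 : c = "ihr"; · subst h7; decide
  by_cases h8 : c = "sie/sie"; · subst h8; decide
  simp only [pvBits, pvBitTable, PySem.Dict.getD_eq_get?_getD, PySem.Dict.get?_mk_cons,
    beq_iff_eq]
  rw [if_neg h1, if_neg h2, if_neg h3, if_neg h4, if_neg h5, if_neg h6, if_neg h7, if_neg h8,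
    if_neg (fun h => h1 h.symm), if_neg (fun h => h2 h.symm), if_neg (fun h => h3 h.symm),
    if_neg (fun h => h4 h.symm), if_neg (fun h => h5 h.symm), if_neg (fun h => h6 h.symm),
    if_neg (fun h => h7 h.symm), if_neg (fun h => h8 h.symm)]
  rfl

-- per-bit reading of a token's flags
lemma pv_tb0 (c : String) : (pvBits c).testBit 0 = decide (c = "ich") := by
  rw [pv_bits_eval]; split_ifs <;> simp_all
lemma pv_tb1 (c : String) : (pvBits c).testBit 1 = decide (c = "du") := by
  rw [pv_bits_eval]; split_ifs <;> simp_all <;> decide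
lemma pv_tb2 (c : String) : (pvBits c).testBit 2 = decide (c = "er") := by
  rw [pv_bits_eval]; split_ifs <;> simp_all <;> decide
lemma pv_tb3 (c : String) : (pvBits c).testBit 3 = decide (c = "sie") := by
  rw [pv_bits_eval]; split_ifs <;> simp_all <;> decide
lemma pv_tb4 (c : String) : (pvBits c).testBit 4 = decide (c = "es") := by
  rw [pv_bits_eval]; split_ifs <;> simp_all <;> decide
lemma pv_tb5 (c : String) : (pvBits c).testBit 5 = decide (c = "wir") := by
  rw [pv_bits_eval]; split_ifs <;> simp_all <;> decide
lemma pv_tb6 (c : String) : (pvBits c).testBit 6 = decide (c = "ihr") := by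
  rw [pv_bits_eval]; split_ifs <;> simp_all <;> decide
lemma pv_tb7 (c : String) : (pvBits c).testBit 7 = decide (c = "sie/sie") := by
  rw [pv_bits_eval]; split_ifs <;> simp_all <;> decide
lemma pv_tb8 (c : String) :
    (pvBits c).testBit 8 =
      decide (c ∉ (["ich","du","er","sie","es","wir","ihr","sie/sie"] : List String)) := by
  rw [pv_bits_eval]; split_ifs <;> simp_all <;> decide

lemma pv_bits_lt (c : String) : pvBits c < 512 := by
  rw [pv_bits_eval]; split_ifs <;> omega

-- per-bit reading of the accumulated mask
lemma pv_mask_testBit (l : List String) (a k : Nat) :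
    (l.foldl (fun m c => m ||| pvBits c) a).testBit k
      = (a.testBit k || l.any (fun c => (pvBits c).testBit k)) := by
  induction l generalizing a with
  | nil => simp
  | cons h t ih => simp [ih, Nat.testBit_or, Bool.or_assoc]

lemma pv_mask_lt (l : List String) (a : Nat) (ha : a < 512) :
    l.foldl (fun m c => m ||| pvBits c) a < 512 := by
  induction l generalizing a with
  | nil => exact ha
  | cons h t ih => exact ih _ (Nat.or_lt_two_pow (n := 9) ha (pv_bits_lt h))

-- mask = v iff the nine low bits match
lemma pv_mask_eq_iff (l : List String) (v : Nat) (hv : v < 512) :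
    pvMaskOf l = v ↔ ∀ k < 9, (l.any (fun c => (pvBits c).testBit k)) = v.testBit k := by
  constructor
  · intro h k _
    rw [← h, pvMaskOf, pv_mask_testBit]
    simp
  · intro h
    apply Nat.eq_of_testBit_eq
    intro k
    by_cases hk : k < 9
    · rw [pvMaskOf, pv_mask_testBit]
      simp [h k hk]
    · rw [Nat.testBit_eq_false_of_lt (n := pvMaskOf l), Nat.testBit_eq_false_of_lt (n := v)]
      · calc v < 512 := hv
          _ = 2^9 := by norm_num
          _ ≤ 2^k := Nat.pow_le_pow_right (by norm_num) (by omega)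
      · calc pvMaskOf l < 512 := pv_mask_lt l 0 (by norm_num)
          _ = 2^9 := by norm_num
          _ ≤ 2^k := Nat.pow_le_pow_right (by norm_num) (by omega)

-- mask = v iff presence of each token matches v's bits
lemma pv_mask_eq_iff9 (l : List String) (v : Nat) (hv : v < 512) :
    pvMaskOf l = v ↔
      (("ich" ∈ l ↔ v.testBit 0 = true) ∧ ("du" ∈ l ↔ v.testBit 1 = true) ∧
       ("er" ∈ l ↔ v.testBit 2 = true) ∧ ("sie" ∈ l ↔ v.testBit 3 = true) ∧
       ("es" ∈ l ↔ v.testBit 4 = true) ∧ ("wir" ∈ l ↔ v.testBit 5 = true) ∧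
       ("ihr" ∈ l ↔ v.testBit 6 = true) ∧ ("sie/sie" ∈ l ↔ v.testBit 7 = true) ∧
       ((∃ c ∈ l, c ∉ (["ich","du","er","sie","es","wir","ihr","sie/sie"] : List String)) ↔
         v.testBit 8 = true)) := by
  rw [pv_mask_eq_iff l v hv]
  constructor
  · intro h
    refine ⟨?_, ?_, ?_, ?_, ?_, ?_, ?_, ?_, ?_⟩ <;>
      [rw [← h 0 (by omega)]; rw [← h 1 (by omega)]; rw [← h 2 (by omega)];
       rw [← h 3 (by omega)]; rw [← h 4 (by omega)]; rw [← h 5 (by omega)];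
       rw [← h 6 (by omega)]; rw [← h 7 (by omega)]; rw [← h 8 (by omega)]] <;>
      simp only [List.any_eq_true, pv_tb0, pv_tb1, pv_tb2, pv_tb3, pv_tb4, pv_tb5, pv_tb6,
        pv_tb7, pv_tb8, decide_eq_true_eq, exists_eq_right]
  · rintro ⟨g0, g1, g2, g3, g4, g5, g6, g7, g8⟩ k hk
    interval_cases k <;> rw [Bool.eq_iff_iff] <;>
      simp only [List.any_eq_true, pv_tb0, pv_tb1, pv_tb2, pv_tb3, pv_tb4, pv_tb5, pv_tb6,
        pv_tb7, pv_tb8, decide_eq_true_eq] <;>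
      [simpa using g0; simpa using g1; simpa using g2; simpa using g3; simpa using g4;
       simpa using g5; simpa using g6; simpa using g7; simpa using g8]

-- a set-equality test against a key of known tokens is a mask-value test
lemma pv_key_master (l K : List String) (v : Nat) (hv : v < 512)
    (hsub : ∀ x ∈ K, x ∈ (["ich","du","er","sie","es","wir","ihr","sie/sie"] : List String))
    (h0 : "ich" ∈ K ↔ v.testBit 0 = true) (h1 : "du" ∈ K ↔ v.testBit 1 = true)
    (h2 : "er" ∈ K ↔ v.testBit 2 = true) (h3 : "sie" ∈ K ↔ v.testBit 3 = true)
    (h4 : "es" ∈ K ↔ v.testBit 4 = true) (h5 : "wir" ∈ K ↔ v.testBit 5 = true)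
    (h6 : "ihr" ∈ K ↔ v.testBit 6 = true) (h7 : "sie/sie" ∈ K ↔ v.testBit 7 = true)
    (h8 : v.testBit 8 = false) :
    PySem.Set.equal (PySem.Set.ofList l) K = decide (pvMaskOf l = v) := by
  rw [Bool.eq_iff_iff]
  simp only [PySem.Set.equal_iff, PySem.Set.mem_ofList, decide_eq_true_eq]
  rw [pv_mask_eq_iff9 l v hv]
  constructor
  · intro h
    refine ⟨(h "ich").trans h0, (h "du").trans h1, (h "er").trans h2, (h "sie").trans h3,
      (h "es").trans h4, (h "wir").trans h5, (h "ihr").trans h6, (h "sie/sie").trans h7, ?_⟩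
    constructor
    · rintro ⟨c, hc, hn⟩
      exact absurd (hsub c ((h c).mp hc)) hn
    · intro hb
      rw [h8] at hb; cases hb
  · rintro ⟨g0, g1, g2, g3, g4, g5, g6, g7, g8⟩ x
    constructor
    · intro hx
      by_cases hxk : x ∈ (["ich","du","er","sie","es","wir","ihr","sie/sie"] : List String)
      · simp only [List.mem_cons, List.not_mem_nil, or_false] at hxk
        rcases hxk with rfl | rfl | rfl | rfl | rfl | rfl | rfl | rfl
        · exact h0.mpr (g0.mp hx)
        · exact h1.mpr (g1.mp hx)
        · exact h2.mpr (g2.mp hx)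
        · exact h3.mpr (g3.mp hx)
        · exact h4.mpr (g4.mp hx)
        · exact h5.mpr (g5.mp hx)
        · exact h6.mpr (g6.mp hx)
        · exact h7.mpr (g7.mp hx)
      · rw [h8] at g8
        exact absurd (g8.mp ⟨x, hx, hxk⟩) (by simp)
    · intro hxK
      have hxk := hsub x hxK
      simp only [List.mem_cons, List.not_mem_nil, or_false] at hxk
      rcases hxk with rfl | rfl | rfl | rfl | rfl | rfl | rfl | rfl
      · exact g0.mpr (h0.mp hxK)
      · exact g1.mpr (h1.mp hxK)
      · exact g2.mpr (h2.mp hxK)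
      · exact g3.mpr (h3.mp hxK)
      · exact g4.mpr (h4.mp hxK)
      · exact g5.mpr (h5.mp hxK)
      · exact g6.mpr (h6.mp hxK)
      · exact g7.mpr (h7.mp hxK)

-- the seven key correspondences (set equality on the cleaned set <-> mask value)
lemma pv_key_ich (l : List String) :
    PySem.Set.equal (PySem.Set.ofList l) ["ich"] = decide (pvMaskOf l = 1) :=
  pv_key_master l _ 1 (by omega) (by decide) (by decide) (by decide) (by decide) (by decide)
    (by decide) (by decide) (by decide) (by decide) (by decide)
lemma pv_key_du (l : List String) :
    PySem.Set.equal (PySem.Set.ofList l) ["du"] = decide (pvMaskOf l = 2) :=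
  pv_key_master l _ 2 (by omega) (by decide) (by decide) (by decide) (by decide) (by decide)
    (by decide) (by decide) (by decide) (by decide) (by decide)
lemma pv_key_ese (l : List String) :
    PySem.Set.equal (PySem.Set.ofList l) ["er", "sie", "es"] = decide (pvMaskOf l = 28) :=
  pv_key_master l _ 28 (by omega) (by decide) (by decide) (by decide) (by decide) (by decide)
    (by decide) (by decide) (by decide) (by decide) (by decide)
lemma pv_key_wir (l : List String) :
    PySem.Set.equal (PySem.Set.ofList l) ["wir"] = decide (pvMaskOf l = 32) :=
  pv_key_master l _ 32 (by omega) (by decide) (by decide) (by decide) (by decide) (by decide)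
    (by decide) (by decide) (by decide) (by decide) (by decide)
lemma pv_key_ihr (l : List String) :
    PySem.Set.equal (PySem.Set.ofList l) ["ihr"] = decide (pvMaskOf l = 64) :=
  pv_key_master l _ 64 (by omega) (by decide) (by decide) (by decide) (by decide) (by decide)
    (by decide) (by decide) (by decide) (by decide) (by decide)
lemma pv_key_sie (l : List String) :
    PySem.Set.equal (PySem.Set.ofList l) ["sie"] = decide (pvMaskOf l = 8) :=
  pv_key_master l _ 8 (by omega) (by decide) (by decide) (by decide) (by decide) (by decide)
    (by decide) (by decide) (by decide) (by decide) (by decide)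
lemma pv_key_sie2 (l : List String) :
    PySem.Set.equal (PySem.Set.ofList l) ["sie", "sie/sie"] = decide (pvMaskOf l = 136) :=
  pv_key_master l _ 136 (by omega) (by decide) (by decide) (by decide) (by decide) (by decide)
    (by decide) (by decide) (by decide) (by decide) (by decide)

-- ===== VERDICT (by name: the statement is the Claim_ definition above) =====
theorem slot_from_pronouns_spec : Claim_equal_slot_from_pronouns := by
  intro pronouns _
  unfold Spec_slot_from_pronouns
  simp only [slot_from_pronouns, slot_from_pronouns_alt]
  rw [pv_cleanA_eq, pv_cleanB_eq, show PySem.Set.empty = ([] : PySem.Set String) from rfl,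
    ← PySem.Set.ofList_eq_foldl]
  rw [show (pvClean pronouns).foldl (fun m c => m ||| pvBits c) 0 = pvMaskOf (pvClean pronouns) from rfl]
  rw [pv_key_ich, pv_key_du, pv_key_ese, pv_key_wir, pv_key_ihr, pv_key_sie, pv_key_sie2]
  simp only [decide_eq_true_eq, pvSlotTable, PySem.Dict.getD_eq_get?_getD,
    PySem.Dict.get?_mk_cons, beq_iff_eq, Bool.or_eq_true]
  split_ifs <;> first | rfl | omega
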